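-- pv_equiv track=rewrite | github.com/mohammadfaiizan/ProjectI | DSA/Problem/Graph/02_Depth_First_Search_DFS/1020_Number_of_Enclaves.py | numEnclaves_approach1_boundary_elimination
-- ===== SOURCE A (Python) =====
-- from typing import List
--
-- def numEnclaves_approach1_boundary_elimination(grid: List[List[int]]) -> int:
--     """
--     Approach 1: Boundary Elimination Strategy
--
--     Eliminate all land cells connected to boundary, then count remaining.
--     Same strategy as "Surrounded Regions" problem.
--
--     Time: O(M*N) - visit each cell at most once
--     Space: O(M*N) - recursion stack depth
--     """
--     if not grid or not grid[0]:
--         return 0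
--
--     m, n = len(grid), len(grid[0])
--
--     def dfs_eliminate(i, j):
--         """Remove all connected land cells (mark as water)"""
--         if (i < 0 or i >= m or j < 0 or j >= n or grid[i][j] != 1):
--             return
--
--         grid[i][j] = 0  # Mark as water/visited
--
--         # Explore 4 directions
--         dfs_eliminate(i + 1, j)
--         dfs_eliminate(i - 1, j)
--         dfs_eliminate(i, j + 1)
--         dfs_eliminate(i, j - 1)
--
--     # Eliminate boundary-connected land cells
--     # Top and bottom rows
--     for j in range(n):
--         if grid[0][j] == 1:
--             dfs_eliminate(0, j)
--         if grid[m-1][j] == 1: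
--             dfs_eliminate(m-1, j)
--
--     # Left and right columns
--     for i in range(m):
--         if grid[i][0] == 1:
--             dfs_eliminate(i, 0)
--         if grid[i][n-1] == 1:
--             dfs_eliminate(i, n-1)
--
--     # Count remaining land cells (these are enclaves)
--     return sum(grid[i][j] for i in range(m) for j in range(n))
-- ===== SOURCE B (Python) =====
-- from typing import List
--
-- def numEnclaves_approach1_boundary_elimination(grid: List[List[int]]) -> int:
--     """Boundary elimination with an explicit iterative stack instead of recursion.
--
--     Mutates grid in place exactly like the recursive version (zeroes the
--     border-connected land cells)."""
--     if not grid or not grid[0]: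
--         return 0
--
--     m, n = len(grid), len(grid[0])
--
--     # Seed worklist: border coordinates in scan order (the pop re-checks the cell).
--     seeds = []
--     for j in range(n):
--         seeds.append((0, j))
--         seeds.append((m - 1, j))
--     for i in range(m):
--         seeds.append((i, 0))
--         seeds.append((i, n - 1))
--
--     stack = list(reversed(seeds))
--     while stack:
--         i, j = stack.pop()
--         if 0 <= i < m and 0 <= j < n and grid[i][j] == 1:
--             grid[i][j] = 0
--             stack.extend([(i, j - 1), (i, j + 1), (i - 1, j), (i + 1, j)])
--
--     return sum(sum(row[:n]) for row in grid)
-- ===== Notes on version B (the rewrite author's own statement) =====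
-- stated objective: alternative
-- what changed: The recursive dfs_eliminate is replaced by an explicit iterative flood fill: all border coordinates are collected into one worklist and a single while-loop pops a cell, zeroes it if it is in-bounds land, and pushes its four neighbours; the final count sums row slices instead of indexing every cell (constant-factor win: no Python function-call recursion).
import Mathlib
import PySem

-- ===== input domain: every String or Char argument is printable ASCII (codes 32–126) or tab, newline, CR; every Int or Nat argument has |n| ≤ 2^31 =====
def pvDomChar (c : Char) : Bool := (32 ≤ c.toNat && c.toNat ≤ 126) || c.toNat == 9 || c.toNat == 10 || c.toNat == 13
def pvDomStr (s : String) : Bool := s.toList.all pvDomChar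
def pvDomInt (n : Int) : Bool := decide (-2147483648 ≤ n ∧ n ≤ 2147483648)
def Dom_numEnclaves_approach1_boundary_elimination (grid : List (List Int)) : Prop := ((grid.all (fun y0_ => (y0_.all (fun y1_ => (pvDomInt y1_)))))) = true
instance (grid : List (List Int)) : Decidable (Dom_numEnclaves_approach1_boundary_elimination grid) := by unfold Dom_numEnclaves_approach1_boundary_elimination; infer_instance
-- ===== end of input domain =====

-- B replaces the recursive dfs_eliminate with an explicit iterative stack flood fill over a
-- border-seeded worklist (alternative decomposition, same asymptotic cost); both Pythons mutate
-- the grid argument in place identically — the equivalence proved here is about the return value.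

-- ===== PORT A =====
-- Shared cell primitives: grid[i][j] reads/writes occur in both Pythons only after the bounds
-- guard 0 ≤ i < m, 0 ≤ j < n, where (under Pre_, rows at least as long as row 0) getD/set are
-- exact for Python's grid[i][j] and grid[i][j] = 0.
def getCell (g : List (List Int)) (i j : Int) : Int := (g.getD i.toNat []).getD j.toNat 0
def setCell (g : List (List Int)) (i j : Int) : List (List Int) :=
  g.set i.toNat ((g.getD i.toNat []).set j.toNat 0)
def onesCount (g : List (List Int)) : Nat := (g.map (fun r => r.countP (fun x => x == 1))).sum

theorem countP_set_zero (r : List Int) (l : Nat) (h : r.getD l 0 = 1) :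
    (r.set l 0).countP (fun x => x == 1) + 1 = r.countP (fun x => x == 1) := by
  induction r generalizing l with
  | nil => simp at h
  | cons a r ih =>
    cases l with
    | zero =>
      simp only [List.getD_cons_zero] at h
      simp [List.set, h]
    | succ l =>
      simp only [List.getD_cons_succ] at h
      simp only [List.set, List.countP_cons]
      have := ih l h
      omega

theorem ones_set (g : List (List Int)) (i j : Int) (h : getCell g i j = 1) :
    onesCount (setCell g i j) + 1 = onesCount g := by
  unfold getCell at h
  unfold setCell onesCount
  generalize i.toNat = k at *
  generalize j.toNat = l at *
  induction g generalizing k with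
  | nil => simp at h
  | cons r g ih =>
    cases k with
    | zero =>
      simp only [List.getD_cons_zero] at h
      simp only [List.set, List.map_cons, List.sum_cons, List.getD_cons_zero]
      have := countP_set_zero r l h
      omega
    | succ k =>
      simp only [List.getD_cons_succ] at h
      simp only [List.set, List.map_cons, List.sum_cons, List.getD_cons_succ]
      have := ih k h
      omega


def dfsA (m n : Int) : Nat → List (List Int) → Int → Int → List (List Int)
  | 0, g, _, _ => g
  | fuel+1, g, i, j =>
    if i < 0 ∨ m ≤ i ∨ j < 0 ∨ n ≤ j ∨ getCell g i j ≠ 1 then g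
    else
      let g0 := setCell g i j
      let g1 := dfsA m n fuel g0 (i+1) j
      let g2 := dfsA m n fuel g1 (i-1) j
      let g3 := dfsA m n fuel g2 i (j+1)
      dfsA m n fuel g3 i (j-1)

def dfsTop (m n : Int) (g : List (List Int)) (i j : Int) : List (List Int) :=
  dfsA m n (onesCount g + 1) g i j

-- Port of A: the recursive dfs_eliminate (fuel = onesCount g + 1 is only a totality guard;
-- the lemmas below show any fuel above the number of 1-cells computes the same grid).
def numEnclaves_approach1_boundary_elimination (grid : List (List Int)) : Int :=
  if grid.headD [] = [] then 0
  else
    let m : Int := grid.length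
    let n : Int := (grid.headD []).length
    let g1 := (PySem.List.pyRange 0 n).foldl (fun g j =>
        let ga := if getCell g 0 j = 1 then dfsTop m n g 0 j else g
        if getCell ga (m-1) j = 1 then dfsTop m n ga (m-1) j else ga) grid
    let g2 := (PySem.List.pyRange 0 m).foldl (fun g i =>
        let ga := if getCell g i 0 = 1 then dfsTop m n g i 0 else g
        if getCell ga i (n-1) = 1 then dfsTop m n ga i (n-1) else ga) g1
    (PySem.List.pyRange 0 m).foldl (fun acc i =>
      (PySem.List.pyRange 0 n).foldl (fun acc j => acc + getCell g2 i j) acc) 0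

-- ===== PORT B =====
-- Port of B: the explicit stack loop (pop from the end, push the four neighbours).
def stackRun (m n : Int) (g : List (List Int)) (st : List (Int × Int)) : List (List Int) :=
  match hp : PySem.List.pop? st with
  | none => g
  | some (p, st') =>
    if hc : 0 ≤ p.1 ∧ p.1 < m ∧ 0 ≤ p.2 ∧ p.2 < n ∧ getCell g p.1 p.2 = 1 then
      stackRun m n (setCell g p.1 p.2)
        (st' ++ [(p.1, p.2 - 1), (p.1, p.2 + 1), (p.1 - 1, p.2), (p.1 + 1, p.2)])
    else stackRun m n g st'
termination_by (5 * onesCount g + st.length)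
decreasing_by
  · have h1 := ones_set g p.1 p.2 hc.2.2.2.2
    have h2 : st'.length + 1 = st.length := PySem.List.length_of_pop?_eq_some st hp
    simp only [List.length_append, List.length_cons, List.length_nil] at *
    omega
  · have h2 : st'.length + 1 = st.length := PySem.List.length_of_pop?_eq_some st hp
    omega

def numEnclaves_approach1_boundary_elimination_alt (grid : List (List Int)) : Int :=
  if grid.headD [] = [] then 0
  else
    let m : Int := grid.length
    let n : Int := (grid.headD []).length
    let seeds1 := (PySem.List.pyRange 0 n).foldl (fun s j => s ++ [((0:Int), j), (m-1, j)]) []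
    let seeds := (PySem.List.pyRange 0 m).foldl (fun s i => s ++ [(i, (0:Int)), (i, n-1)]) seeds1
    let g2 := stackRun m n grid seeds.reverse
    g2.foldl (fun acc row => acc + (PySem.List.slice row none (some n)).sum) 0
-- ===== PRECONDITION & SPEC =====
-- Pre_ excludes exactly the ragged grids on which the Python A raises IndexError: a row shorter
-- than the (nonempty) first row is eventually indexed at a column only the first row's length
-- justifies. B also raises there; nothing is claimed about those inputs.
def Pre_numEnclaves_approach1_boundary_elimination (grid : List (List Int)) : Prop :=
  ∀ r ∈ grid, (grid.headD []).length ≤ r.length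
instance (grid : List (List Int)) : Decidable (Pre_numEnclaves_approach1_boundary_elimination grid) := by unfold Pre_numEnclaves_approach1_boundary_elimination; infer_instance
def pvWitness_numEnclaves_approach1_boundary_elimination : List (List Int) :=
  [[1, 1, 0], [0, 1, 0], [0, 0, 1]]
def Spec_numEnclaves_approach1_boundary_elimination (grid : List (List Int)) (out : Int) : Prop := out = numEnclaves_approach1_boundary_elimination_alt grid
instance (grid : List (List Int)) (out : Int) : Decidable (Spec_numEnclaves_approach1_boundary_elimination grid out) := by unfold Spec_numEnclaves_approach1_boundary_elimination; infer_instance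

-- ===== CLAIM (what is proved, stated in full; the proofs are below) =====
def Claim_equal_numEnclaves_approach1_boundary_elimination : Prop := ∀ (grid : List (List Int)), Dom_numEnclaves_approach1_boundary_elimination grid → Pre_numEnclaves_approach1_boundary_elimination grid → Spec_numEnclaves_approach1_boundary_elimination grid (numEnclaves_approach1_boundary_elimination grid)

-- ===== LEMMAS AND PROOFS =====

theorem ones_dfsA (m n : Int) : ∀ (fuel : Nat) (g : List (List Int)) (i j : Int),
    onesCount (dfsA m n fuel g i j) ≤ onesCount g := by
  intro fuel
  induction fuel with
  | zero => intro g i j; simp [dfsA]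
  | succ fuel ih =>
    intro g i j
    by_cases hg : i < 0 ∨ m ≤ i ∨ j < 0 ∨ n ≤ j ∨ getCell g i j ≠ 1
    · simp [dfsA, hg]
    · have hcell : getCell g i j = 1 := by push Not at hg; exact hg.2.2.2.2
      have h0 := ones_set g i j hcell
      simp only [dfsA, if_neg hg]
      calc onesCount (dfsA m n fuel (dfsA m n fuel (dfsA m n fuel (dfsA m n fuel (setCell g i j) (i+1) j) (i-1) j) i (j+1)) i (j-1))
          ≤ onesCount (dfsA m n fuel (dfsA m n fuel (dfsA m n fuel (setCell g i j) (i+1) j) (i-1) j) i (j+1)) := ih _ _ _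
        _ ≤ onesCount (dfsA m n fuel (dfsA m n fuel (setCell g i j) (i+1) j) (i-1) j) := ih _ _ _
        _ ≤ onesCount (dfsA m n fuel (setCell g i j) (i+1) j) := ih _ _ _
        _ ≤ onesCount (setCell g i j) := ih _ _ _
        _ ≤ onesCount g := by omega

theorem dfsA_fuel (m n : Int) : ∀ (f1 f2 : Nat) (g : List (List Int)) (i j : Int),
    onesCount g < f1 → onesCount g < f2 → dfsA m n f1 g i j = dfsA m n f2 g i j := by
  intro f1
  induction f1 with
  | zero => intro f2 g i j h1 _; omega
  | succ f1 ih =>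
    intro f2 g i j h1 h2
    cases f2 with
    | zero => omega
    | succ f2 =>
      by_cases hg : i < 0 ∨ m ≤ i ∨ j < 0 ∨ j ≥ n ∨ getCell g i j ≠ 1
      · simp [dfsA, hg]
      · have hcell : getCell g i j = 1 := by push Not at hg; exact hg.2.2.2.2
        have h0 := ones_set g i j hcell
        simp only [dfsA, if_neg hg]
        have b0 : onesCount (setCell g i j) < f1 ∧ onesCount (setCell g i j) < f2 := by omega
        have e1 : dfsA m n f1 (setCell g i j) (i+1) j = dfsA m n f2 (setCell g i j) (i+1) j :=
          ih f2 _ _ _ b0.1 b0.2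
        have b1 : onesCount (dfsA m n f2 (setCell g i j) (i+1) j) ≤ onesCount (setCell g i j) := ones_dfsA m n _ _ _ _
        have e2 : dfsA m n f1 (dfsA m n f2 (setCell g i j) (i+1) j) (i-1) j
                = dfsA m n f2 (dfsA m n f2 (setCell g i j) (i+1) j) (i-1) j := ih f2 _ _ _ (by omega) (by omega)
        have b2 : onesCount (dfsA m n f2 (dfsA m n f2 (setCell g i j) (i+1) j) (i-1) j) ≤ onesCount (setCell g i j) :=
          le_trans (ones_dfsA m n _ _ _ _) b1
        have e3 : dfsA m n f1 (dfsA m n f2 (dfsA m n f2 (setCell g i j) (i+1) j) (i-1) j) i (j+1)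
                = dfsA m n f2 (dfsA m n f2 (dfsA m n f2 (setCell g i j) (i+1) j) (i-1) j) i (j+1) := ih f2 _ _ _ (by omega) (by omega)
        have b3 : onesCount (dfsA m n f2 (dfsA m n f2 (dfsA m n f2 (setCell g i j) (i+1) j) (i-1) j) i (j+1)) ≤ onesCount (setCell g i j) :=
          le_trans (ones_dfsA m n _ _ _ _) b2
        have e4 : dfsA m n f1 (dfsA m n f2 (dfsA m n f2 (dfsA m n f2 (setCell g i j) (i+1) j) (i-1) j) i (j+1)) i (j-1)
                = dfsA m n f2 (dfsA m n f2 (dfsA m n f2 (dfsA m n f2 (setCell g i j) (i+1) j) (i-1) j) i (j+1)) i (j-1) := ih f2 _ _ _ (by omega) (by omega)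
        rw [e1, e2, e3, e4]

theorem dfsA_succ (m n : Int) (fuel : Nat) (g : List (List Int)) (i j : Int) :
    dfsA m n (fuel+1) g i j =
      if i < 0 ∨ m ≤ i ∨ j < 0 ∨ n ≤ j ∨ getCell g i j ≠ 1 then g
      else dfsA m n fuel (dfsA m n fuel (dfsA m n fuel (dfsA m n fuel (setCell g i j) (i+1) j) (i-1) j) i (j+1)) i (j-1) := rfl

theorem dfsTop_eq_self (m n : Int) (g : List (List Int)) (i j : Int)
    (h : i < 0 ∨ m ≤ i ∨ j < 0 ∨ n ≤ j ∨ getCell g i j ≠ 1) : dfsTop m n g i j = g := by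
  simp [dfsTop, dfsA, h]

theorem dfsTop_unfold (m n : Int) (g : List (List Int)) (i j : Int)
    (h : ¬ (i < 0 ∨ m ≤ i ∨ j < 0 ∨ n ≤ j ∨ getCell g i j ≠ 1)) :
    dfsTop m n g i j =
      ([(i+1, j), (i-1, j), (i, j+1), (i, j-1)] : List (Int × Int)).foldl
        (fun g p => dfsTop m n g p.1 p.2) (setCell g i j) := by
  have hcell : getCell g i j = 1 := by push Not at h; exact h.2.2.2.2
  have h0 := ones_set g i j hcell
  simp only [List.foldl_cons, List.foldl_nil, dfsTop]
  rw [dfsA_succ, if_neg h]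
  have b0 : onesCount (setCell g i j) < onesCount g := by omega
  have e1 : dfsA m n (onesCount g) (setCell g i j) (i+1) j
          = dfsA m n (onesCount (setCell g i j) + 1) (setCell g i j) (i+1) j :=
    dfsA_fuel m n _ _ _ _ _ (by omega) (by omega)
  rw [e1]
  set G1 := dfsA m n (onesCount (setCell g i j) + 1) (setCell g i j) (i+1) j with hG1
  have b1 : onesCount G1 ≤ onesCount (setCell g i j) := ones_dfsA m n _ _ _ _
  have e2 : dfsA m n (onesCount g) G1 (i-1) j = dfsA m n (onesCount G1 + 1) G1 (i-1) j :=
    dfsA_fuel m n _ _ _ _ _ (by omega) (by omega)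
  rw [e2]
  set G2 := dfsA m n (onesCount G1 + 1) G1 (i-1) j with hG2
  have b2 : onesCount G2 ≤ onesCount (setCell g i j) := le_trans (ones_dfsA m n _ _ _ _) b1
  have e3 : dfsA m n (onesCount g) G2 i (j+1) = dfsA m n (onesCount G2 + 1) G2 i (j+1) :=
    dfsA_fuel m n _ _ _ _ _ (by omega) (by omega)
  rw [e3]
  set G3 := dfsA m n (onesCount G2 + 1) G2 i (j+1) with hG3
  have b3 : onesCount G3 ≤ onesCount (setCell g i j) := le_trans (ones_dfsA m n _ _ _ _) b2
  exact dfsA_fuel m n _ _ _ _ _ (by omega) (by omega)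

theorem stackRun_nil (m n : Int) (g : List (List Int)) : stackRun m n g [] = g := by
  rw [stackRun]
  split
  · rfl
  · next q st' heq => simp [PySem.List.pop?] at heq

theorem stackRun_reverse (m n : Int) : ∀ (k : Nat) (ws : List (Int × Int)) (g : List (List Int)),
    5 * onesCount g + ws.length ≤ k →
    stackRun m n g ws.reverse = ws.foldl (fun g p => dfsTop m n g p.1 p.2) g := by
  intro k
  induction k with
  | zero =>
    intro ws g hk
    have hw : ws = [] := by cases ws <;> simp_all
    subst hw
    simp [stackRun_nil]
  | succ k ih =>
    intro ws g hk
    cases ws with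
    | nil => simp [stackRun_nil]
    | cons p ts =>
      have hrev : (p :: ts).reverse = ts.reverse ++ [p] := by simp
      rw [hrev, stackRun]
      rw [List.foldl_cons]
      split
      · next heq =>
        rw [PySem.List.pop?_last] at heq
        exact absurd heq (by simp)
      · next q st' heq =>
        rw [PySem.List.pop?_last] at heq
        injection heq with h
        obtain ⟨h1, h2⟩ := Prod.mk.inj h
        subst h1; subst h2
        simp only [List.length_cons] at hk
        by_cases hc : 0 ≤ p.1 ∧ p.1 < m ∧ 0 ≤ p.2 ∧ p.2 < n ∧ getCell g p.1 p.2 = 1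
        · rw [dif_pos hc]
          have hones := ones_set g p.1 p.2 hc.2.2.2.2
          have hA : (ts.reverse ++ [(p.1, p.2 - 1), (p.1, p.2 + 1), (p.1 - 1, p.2), (p.1 + 1, p.2)])
              = (([(p.1 + 1, p.2), (p.1 - 1, p.2), (p.1, p.2 + 1), (p.1, p.2 - 1)] ++ ts) :
                  List (Int × Int)).reverse := by simp
          rw [hA, ih _ _ (by simp; omega)]
          have hng : ¬ (p.1 < 0 ∨ m ≤ p.1 ∨ p.2 < 0 ∨ n ≤ p.2 ∨ getCell g p.1 p.2 ≠ 1) := by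
            obtain ⟨a1, a2, a3, a4, a5⟩ := hc; omega
          rw [List.foldl_append]
          rw [show ([(p.1 + 1, p.2), (p.1 - 1, p.2), (p.1, p.2 + 1), (p.1, p.2 - 1)] :
                List (Int × Int)).foldl (fun g p => dfsTop m n g p.1 p.2) (setCell g p.1 p.2)
              = dfsTop m n g p.1 p.2 from (dfsTop_unfold m n g p.1 p.2 hng).symm]
        · rw [dif_neg hc]
          have hg : p.1 < 0 ∨ m ≤ p.1 ∨ p.2 < 0 ∨ n ≤ p.2 ∨ getCell g p.1 p.2 ≠ 1 := by
            by_contra hng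
            push Not at hng
            exact hc ⟨hng.1, hng.2.1, hng.2.2.1, hng.2.2.2.1, hng.2.2.2.2⟩
          rw [ih _ _ (by omega), dfsTop_eq_self m n g p.1 p.2 hg]

theorem if_dfsTop (m n : Int) (g : List (List Int)) (i j : Int) :
    (if getCell g i j = 1 then dfsTop m n g i j else g) = dfsTop m n g i j := by
  split
  · rfl
  · next h => exact (dfsTop_eq_self m n g i j (Or.inr (Or.inr (Or.inr (Or.inr h))))).symm

theorem foldl_two_flatMap (m n : Int) (f1 f2 : Int → Int × Int) :
    ∀ (l : List Int) (g : List (List Int)),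
    l.foldl (fun g x => dfsTop m n (dfsTop m n g (f1 x).1 (f1 x).2) (f2 x).1 (f2 x).2) g
    = (l.flatMap fun x => [f1 x, f2 x]).foldl (fun g p => dfsTop m n g p.1 p.2) g := by
  intro l
  induction l with
  | nil => intro g; rfl
  | cons x l ih =>
    intro g
    simp only [List.foldl_cons, List.flatMap_cons, List.foldl_append]
    exact ih _

theorem rowLens_setCell (g : List (List Int)) (i j : Int) :
    (setCell g i j).map List.length = g.map List.length := by
  unfold setCell
  by_cases h : i.toNat < g.length
  · rw [List.map_set]
    have h1 : ((g.getD i.toNat []).set j.toNat 0).length = (g.getD i.toNat []).length :=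
      List.length_set
    rw [h1, List.getD_eq_getElem g [] h]
    have h2 : g[i.toNat].length = (g.map List.length)[i.toNat]'(by simpa using h) := by
      simp
    rw [h2, List.set_getElem_self]
  · rw [List.set_eq_of_length_le (by omega)]

theorem rowLens_dfsA (m n : Int) : ∀ (fuel : Nat) (g : List (List Int)) (i j : Int),
    (dfsA m n fuel g i j).map List.length = g.map List.length := by
  intro fuel
  induction fuel with
  | zero => intro g i j; rfl
  | succ fuel ih =>
    intro g i j
    rw [dfsA_succ]
    split
    · rfl
    · rw [ih, ih, ih, ih, rowLens_setCell]

theorem rowLens_foldl (m n : Int) : ∀ (l : List (Int × Int)) (g : List (List Int)),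
    (l.foldl (fun g p => dfsTop m n g p.1 p.2) g).map List.length = g.map List.length := by
  intro l
  induction l with
  | nil => intro g; rfl
  | cons p l ih =>
    intro g
    rw [List.foldl_cons, ih, dfsTop, rowLens_dfsA]

theorem rowSum (row : List Int) (acc : Int) (n : Int) (h0 : 0 ≤ n) (h1 : n ≤ (row.length : Int)) :
    (PySem.List.pyRange 0 n).foldl (fun a j => a + row.getD j.toNat 0) acc
      = acc + (row.take n.toNat).sum := by
  have hlen : ((row.take n.toNat).length : Int) = n := by
    simp [List.length_take]
    omega
  have hcongr : (PySem.List.pyRange 0 n).foldl (fun a j => a + row.getD j.toNat 0) acc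
      = (PySem.List.pyRange 0 n).foldl (fun a j => a + PySem.List.pyGetD (row.take n.toNat) j 0) acc := by
    apply PySem.List.foldl_congr_mem
    intro a x hx
    have hx' := (PySem.List.mem_pyRange_one).1 hx
    rw [PySem.List.pyGetD_of_nonneg _ _ hx'.1]
    have hxn : x.toNat < n.toNat := by omega
    rw [List.getD_eq_getElem?_getD, List.getD_eq_getElem?_getD, List.getElem?_take_of_lt hxn]
  rw [hcongr]
  have hr : PySem.List.pyRange 0 n = PySem.List.pyRange 0 (PySem.List.len (row.take n.toNat)) := by
    rw [PySem.List.len_eq, hlen]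
  rw [hr, PySem.List.foldl_pyRange_zero_pyGetD (row.take n.toNat) 0 (fun a x => a + x) acc]
  rw [PySem.List.foldl_add _ (fun x => x) acc]
  simp

theorem sum_eq (G grid : List (List Int)) (hlen : G.length = grid.length)
    (hrows : ∀ r ∈ G, (grid.headD []).length ≤ r.length) :
    (PySem.List.pyRange 0 (grid.length : Int)).foldl (fun acc i =>
        (PySem.List.pyRange 0 ((grid.headD []).length : Int)).foldl
          (fun acc j => acc + getCell G i j) acc) 0
    = G.foldl (fun acc row =>
        acc + (PySem.List.slice row none (some ((grid.headD []).length : Int))).sum) 0 := by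
  have hn0 : (0:Int) ≤ ((grid.headD []).length : Int) := Int.natCast_nonneg _
  rw [PySem.List.foldl_congr_mem (PySem.List.pyRange 0 (grid.length : Int)) _
      (fun acc i => (PySem.List.pyRange 0 ((grid.headD []).length : Int)).foldl
        (fun a j => a + (PySem.List.pyGetD G i []).getD j.toNat 0) acc) 0
      (by
        intro acc x hx
        have hx0 : 0 ≤ x := ((PySem.List.mem_pyRange_one).1 hx).1
        apply PySem.List.foldl_congr_mem
        intro a j _
        show a + getCell G x j = _
        unfold getCell
        rw [PySem.List.pyGetD_of_nonneg G [] hx0])]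
  rw [show (grid.length : Int) = PySem.List.len G by rw [PySem.List.len_eq, hlen]]
  rw [PySem.List.foldl_pyRange_zero_pyGetD G []
      (fun acc row => (PySem.List.pyRange 0 ((grid.headD []).length : Int)).foldl
        (fun a j => a + row.getD j.toNat 0) acc) 0]
  apply PySem.List.foldl_congr_mem
  intro acc row hrow
  show (PySem.List.pyRange 0 ((grid.headD []).length : Int)).foldl
      (fun a j => a + row.getD j.toNat 0) acc = _
  rw [PySem.List.slice_to row hn0, rowSum row acc _ hn0 (by exact_mod_cast hrows row hrow)]

theorem main_eq (grid : List (List Int))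
    (hpre : ∀ r ∈ grid, (grid.headD []).length ≤ r.length) :
    numEnclaves_approach1_boundary_elimination grid
      = numEnclaves_approach1_boundary_elimination_alt grid := by
  by_cases h0 : grid.headD [] = []
  · unfold numEnclaves_approach1_boundary_elimination
      numEnclaves_approach1_boundary_elimination_alt
    rw [if_pos h0, if_pos h0]
  · simp only [numEnclaves_approach1_boundary_elimination,
      numEnclaves_approach1_boundary_elimination_alt, if_neg h0]
    simp only [if_dfsTop]
    rw [foldl_two_flatMap _ _ (fun j => ((0:Int), j)) (fun j => ((grid.length:Int)-1, j))]
    rw [foldl_two_flatMap _ _ (fun i => (i, (0:Int))) (fun i => (i, ((grid.headD []).length:Int)-1))]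
    rw [PySem.List.foldl_append_eq_flatMap, PySem.List.foldl_append_eq_flatMap, List.nil_append]
    rw [← List.foldl_append]
    set L : List (Int × Int) :=
      ((PySem.List.pyRange 0 ((grid.headD []).length : Int)).flatMap
          fun j => [((0:Int), j), ((grid.length:Int)-1, j)])
        ++ ((PySem.List.pyRange 0 (grid.length : Int)).flatMap
          fun i => [(i, (0:Int)), (i, ((grid.headD []).length:Int)-1)]) with hL
    rw [stackRun_reverse _ _ (5 * onesCount grid + L.length) L grid (le_refl _)]
    set G := L.foldl (fun g p => dfsTop (grid.length:Int) ((grid.headD []).length:Int) g p.1 p.2) grid with hG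
    have hshape : G.map List.length = grid.map List.length := rowLens_foldl _ _ L grid
    have hGlen : G.length = grid.length := by
      have := congrArg List.length hshape; simpa using this
    have hrowsG : ∀ r ∈ G, (grid.headD []).length ≤ r.length := by
      intro r hr
      have hmem : r.length ∈ G.map List.length := List.mem_map_of_mem hr
      rw [hshape] at hmem
      obtain ⟨r', hr', hlen'⟩ := List.mem_map.1 hmem
      rw [← hlen']
      exact hpre r' hr'
    exact sum_eq G grid hGlen hrowsG

-- ===== VERDICT (by name: the statement is the Claim_ definition above) =====
theorem numEnclaves_approach1_boundary_elimination_spec : Claim_equal_numEnclaves_approach1_boundary_elimination := by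
  intro grid _ hpre
  unfold Spec_numEnclaves_approach1_boundary_elimination
  unfold Pre_numEnclaves_approach1_boundary_elimination at hpre
  exact main_eq grid hpre
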